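-- pv_equiv track=rewrite | github.com/dujodujo/lemur | Programiranje/datotek_stevila/seznam/ena.py | skriptopis
-- ===== SOURCE A (Python) =====
-- def skriptopis(stavek):
--     if not stavek:
--         return stavek
--     beseda = stavek[0]
--     for i in range(1,len(stavek)):
--         if not str(stavek[i]).isalpha() or not stavek[i-1].isalpha():
--             beseda += stavek[i]
--     return beseda
-- ===== SOURCE B (Python) =====
-- def skriptopis(stavek):
--     if not stavek:
--         return stavek
--     out = []
--     i = 0
--     n = len(stavek)
--     while i < n:
--         c = stavek[i]
--         out.append(c)
--         i += 1
--         if c.isalpha():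
--             while i < n and stavek[i].isalpha():
--                 i += 1
--     return ''.join(out)
-- ===== Notes on version B (the rewrite author's own statement) =====
-- stated objective: simpler
-- what changed: B scans maximal alphabetic runs with a run-skipping while loop (keep each character, and after an alphabetic one skip the rest of its run), instead of A's index loop testing each position against its predecessor; characters are collected in a list and joined once instead of repeated string concatenation.
import Mathlib
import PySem

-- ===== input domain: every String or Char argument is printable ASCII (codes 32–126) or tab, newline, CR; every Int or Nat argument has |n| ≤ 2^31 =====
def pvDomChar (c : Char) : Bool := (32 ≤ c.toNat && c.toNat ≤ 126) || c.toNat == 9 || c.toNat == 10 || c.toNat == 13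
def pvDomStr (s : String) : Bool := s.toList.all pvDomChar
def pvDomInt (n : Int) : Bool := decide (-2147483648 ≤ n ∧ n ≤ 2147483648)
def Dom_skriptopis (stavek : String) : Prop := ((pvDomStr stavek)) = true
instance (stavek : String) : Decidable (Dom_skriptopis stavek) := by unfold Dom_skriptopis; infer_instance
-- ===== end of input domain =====

-- B keeps every character but skips the tail of each maximal alphabetic run, instead of
-- A's index loop comparing each position with its predecessor; same values, simpler scan.

-- ===== PORT A =====
-- literal port: beseda starts as the first character; for i in range(1, len),
-- append stavek[i] unless both stavek[i] and stavek[i-1] are alphabetic.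
def skriptopis (stavek : String) : String :=
  let l := stavek.toList
  if l = [] then stavek
  else
    let beseda :=
      (PySem.List.pyRange 1 (l.length : Int) 1).foldl
        (fun b i =>
          if !(PySem.Chars.isalpha (PySem.List.pyGetD l i ' ')) ||
             !(PySem.Chars.isalpha (PySem.List.pyGetD l (i - 1) ' ')) then
            b ++ [PySem.List.pyGetD l i ' ']
          else b)
        [l.headD ' ']
    String.ofList beseda

-- ===== PORT B =====
-- the inner 'while stavek[i].isalpha(): i += 1' is the dropWhile of the run's tail
def skriptopisAltGo : List Char → List Char
  | [] => []
  | c :: rest =>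
    if PySem.Chars.isalpha c then
      c :: skriptopisAltGo (rest.dropWhile PySem.Chars.isalpha)
    else
      c :: skriptopisAltGo rest
termination_by l => l.length
decreasing_by
  · exact Nat.lt_succ_of_le (List.length_dropWhile_le _ _)
  · simp

def skriptopis_alt (stavek : String) : String :=
  if stavek.toList = [] then stavek
  else String.ofList (skriptopisAltGo stavek.toList)

-- ===== PRECONDITION & SPEC =====
def Spec_skriptopis (stavek : String) (out : String) : Prop := out = skriptopis_alt stavek
instance (stavek : String) (out : String) : Decidable (Spec_skriptopis stavek out) := by unfold Spec_skriptopis; infer_instance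

-- ===== CLAIM (what is proved, stated in full; the proofs are below) =====
def Claim_equal_skriptopis : Prop := ∀ (stavek : String), Dom_skriptopis stavek → Spec_skriptopis stavek (skriptopis stavek)

-- ===== LEMMAS AND PROOFS =====

-- A's loop body, recast as recursion over the suffix with the previous character carried along
def skriptopisGoA (prev : Char) : List Char → List Char
  | [] => []
  | c :: cs =>
    (if !(PySem.Chars.isalpha c) || !(PySem.Chars.isalpha prev) then [c] else []) ++
      skriptopisGoA c cs

lemma skriptopis_foldl_eq_goA (l : List Char) (acc : List Char) (j : Nat)
    (h1 : 1 ≤ j) (h2 : j ≤ l.length) :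
    (PySem.List.pyRange (j : Int) (l.length : Int) 1).foldl
        (fun b i =>
          if !(PySem.Chars.isalpha (PySem.List.pyGetD l i ' ')) ||
             !(PySem.Chars.isalpha (PySem.List.pyGetD l (i - 1) ' ')) then
            b ++ [PySem.List.pyGetD l i ' ']
          else b) acc
      = acc ++ skriptopisGoA (l.getD (j - 1) ' ') (l.drop j) := by
  induction hn : l.length - j generalizing j acc with
  | zero =>
    have hj : j = l.length := by omega
    subst hj
    rw [PySem.List.pyRange_one_eq_nil le_rfl]
    simp [skriptopisGoA]
  | succ m ih =>
    have hjlt : j < l.length := by omega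
    rw [PySem.List.pyRange_one_cons (by exact_mod_cast hjlt)]
    have hdrop : l.drop j = l[j] :: l.drop (j + 1) := (List.getElem_cons_drop hjlt).symm
    have hget : PySem.List.pyGetD l (j : Int) ' ' = l[j] := by
      rw [PySem.List.pyGetD_natCast]; exact List.getD_eq_getElem l ' ' hjlt
    have hgetp : PySem.List.pyGetD l ((j : Int) - 1) ' ' = l.getD (j - 1) ' ' := by
      have : (j : Int) - 1 = ((j - 1 : Nat) : Int) := by omega
      rw [this, PySem.List.pyGetD_natCast]
    have hstep : ((j : Int) + 1) = ((j + 1 : Nat) : Int) := by push_cast; ring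
    rw [List.foldl_cons, hstep, ih _ (j + 1) (by omega) (by omega) (by omega)]
    rw [hdrop, hget, hgetp]
    simp only [skriptopisGoA, List.getD, Bool.or_eq_true, Bool.not_eq_eq_eq_not, Bool.not_true]
    split_ifs with h <;> simp [List.append_assoc, List.getElem?_eq_getElem hjlt]

-- goA only looks at whether prev is alphabetic, and matches B's run-skipping recursion
lemma skriptopis_goA_eq_altGo : ∀ (t : List Char) (prev : Char),
    skriptopisGoA prev t =
      if PySem.Chars.isalpha prev then
        skriptopisAltGo (t.dropWhile PySem.Chars.isalpha)
      else skriptopisAltGo t := by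
  intro t
  induction t with
  | nil => intro prev; simp [skriptopisGoA, skriptopisAltGo, List.dropWhile]
  | cons c cs ih =>
    intro prev
    by_cases hp : PySem.Chars.isalpha prev = true
    · by_cases hc : PySem.Chars.isalpha c = true
      · simp [skriptopisGoA, hp, hc, ih c, List.dropWhile_cons_of_pos hc]
      · simp only [Bool.not_eq_true] at hc
        simp [skriptopisGoA, hp, hc, ih c, skriptopisAltGo]
    · simp only [Bool.not_eq_true] at hp
      by_cases hc : PySem.Chars.isalpha c = true
      · simp [skriptopisGoA, hp, hc, ih c, skriptopisAltGo]
      · simp only [Bool.not_eq_true] at hc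
        simp [skriptopisGoA, hp, hc, ih c, skriptopisAltGo]

-- ===== VERDICT (by name: the statement is the Claim_ definition above) =====
theorem skriptopis_spec : Claim_equal_skriptopis := by
  intro stavek _
  unfold Spec_skriptopis skriptopis skriptopis_alt
  cases stavek.toList with
  | nil => simp
  | cons c t =>
    simp only [reduceCtorEq, if_false, List.headD_cons]
    have h := skriptopis_foldl_eq_goA (c :: t) [c] 1 le_rfl (by simp)
    simp only [Nat.cast_one, List.drop_one, List.tail_cons] at h
    rw [h, skriptopis_goA_eq_altGo]
    by_cases hc : PySem.Chars.isalpha c = true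
    · simp [skriptopisAltGo, hc]
    · simp only [Bool.not_eq_true] at hc
      simp [skriptopisAltGo, hc]
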